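-- pv_equiv track=rewrite | github.com/Haoran12/assessv2 | scripts/migrate_legacy_vote_and_grade_rules.py | normalize_period_list
-- ===== SOURCE A (Python) =====
-- from typing import Any
--
-- def normalize_period_list(value: Any) -> list[str]:
--     if not isinstance(value, list):
--         return []
--     result: list[str] = []
--     seen: set[str] = set()
--     for item in value:
--         code = str(item or "").strip().upper()
--         if not code or code in seen:
--             continue
--         seen.add(code)
--         result.append(code)
--     return result
-- ===== SOURCE B (Python) =====
-- def normalize_period_list(value):
--     if not isinstance(value, list):
--         return []
--     first_at = {}
--     for position, item in enumerate(value):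
--         code = str(item or "").strip().upper()
--         if code:
--             first_at.setdefault(code, position)
--     return [code for code, _ in sorted(first_at.items(), key=lambda kv: kv[1])]
-- ===== Notes on version B (the rewrite author's own statement) =====
-- stated objective: alternative
-- what changed: Instead of A's streaming seen-set with a result list, B records the first position of each nonempty normalized code in a dict keyed by code, then recovers the output by sorting the (code, first position) pairs by position.
import Mathlib
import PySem

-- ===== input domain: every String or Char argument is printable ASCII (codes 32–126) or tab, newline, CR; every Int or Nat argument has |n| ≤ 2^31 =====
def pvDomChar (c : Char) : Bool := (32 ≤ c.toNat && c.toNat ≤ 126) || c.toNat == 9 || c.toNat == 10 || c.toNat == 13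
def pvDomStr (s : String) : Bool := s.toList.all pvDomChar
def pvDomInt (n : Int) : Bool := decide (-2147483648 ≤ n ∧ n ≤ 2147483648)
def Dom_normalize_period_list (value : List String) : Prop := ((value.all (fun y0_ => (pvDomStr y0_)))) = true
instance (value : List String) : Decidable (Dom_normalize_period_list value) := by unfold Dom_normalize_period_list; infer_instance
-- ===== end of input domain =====

-- B replaces A's streaming seen-set/result-list loop by a dict of first positions per code
-- followed by a sort on position; objective: alternative, same practical cost.


-- ===== PORT A =====
-- str(item or "") on a string item: item if nonempty, else ""
def pvNormCode (item : String) : String :=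
  PySem.Str.upper (PySem.Str.strip (if item == "" then "" else item))

def normalize_period_list (value : List String) : List String :=
  (value.foldl
    (fun (st : List String × PySem.Set String) item =>
      let code := pvNormCode item
      if code = "" ∨ PySem.Set.contains st.2 code then st
      else (st.1 ++ [code], PySem.Set.add st.2 code))
    ([], PySem.Set.empty)).1

-- ===== PORT B =====
def normalize_period_list_alt (value : List String) : List String :=
  let first_at := (PySem.List.enumerate value 0).foldl
    (fun (d : PySem.Dict String Int) p =>
      let code := pvNormCode p.2
      if code = "" then d else d.setdefault code p.1)
    PySem.Dict.empty
  (PySem.List.sorted first_at.items (fun kv => kv.2) false).map (fun kv => kv.1)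

-- ===== PRECONDITION & SPEC =====
def Spec_normalize_period_list (value : List String) (out : List String) : Prop := out = normalize_period_list_alt value
instance (value : List String) (out : List String) : Decidable (Spec_normalize_period_list value out) := by unfold Spec_normalize_period_list; infer_instance

-- ===== CLAIM (what is proved, stated in full; the proofs are below) =====
def Claim_equal_normalize_period_list : Prop := ∀ (value : List String), Dom_normalize_period_list value → Spec_normalize_period_list value (normalize_period_list value)

-- ===== LEMMAS AND PROOFS =====

-- B's dict fold, abbreviated for the lemmas
def pvStepB (d : PySem.Dict String Int) (p : Int × String) : PySem.Dict String Int :=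
  let code := pvNormCode p.2
  if code = "" then d else d.setdefault code p.1

-- A's result list equals the key list of B's dict (both record first occurrences in order).
theorem pv_keys_eq (L : List String) (i : Int) (d : PySem.Dict String Int) :
    (L.foldl
      (fun (st : List String × PySem.Set String) item =>
        let code := pvNormCode item
        if code = "" ∨ PySem.Set.contains st.2 code then st
        else (st.1 ++ [code], PySem.Set.add st.2 code))
      (d.keys, d.keys)).1
    = ((PySem.List.enumerate L i).foldl pvStepB d).keys := by
  induction L generalizing i d with
  | nil => rfl
  | cons a t ih =>
    rw [PySem.List.enumerate_cons, List.foldl_cons, List.foldl_cons]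
    by_cases h0 : pvNormCode a = ""
    · rw [if_pos (Or.inl h0), show pvStepB d (i, a) = d from by simp [pvStepB, h0]]
      exact ih (i+1) d
    · by_cases hc : PySem.Set.contains d.keys (pvNormCode a) = true
      · have hcd : d.contains (pvNormCode a) = true := by
          rw [PySem.Dict.contains_iff_mem_keys]
          simpa using hc
        rw [if_pos (Or.inr hc),
            show pvStepB d (i, a) = d from by
              simp [pvStepB, h0, PySem.Dict.setdefault, hcd]]
        exact ih (i+1) d
      · have hcd : d.contains (pvNormCode a) = false := by
          rw [Bool.eq_false_iff]
          intro hco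
          rw [PySem.Dict.contains_iff_mem_keys] at hco
          exact hc (by simpa using hco)
        have hnm : pvNormCode a ∉ d.keys := by
          have := (PySem.Set.contains_iff (s := d.keys) (x := pvNormCode a))
          intro hmem; exact hc (this.mpr hmem)
        have hstep : pvStepB d (i, a) = d.insert (pvNormCode a) i := by
          simp only [pvStepB, h0, PySem.Dict.setdefault, hcd, Bool.false_eq_true,
            ite_false]
          exact (PySem.Dict.ext (PySem.Dict.items_insert_of_not_contains (v := i) (h := hcd))).symm
        have hkeys : (d.insert (pvNormCode a) i).keys = d.keys ++ [pvNormCode a] :=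
          PySem.Dict.keys_insert_of_not_contains (v := i) (h := hcd)
        have hadd : PySem.Set.add d.keys (pvNormCode a) = d.keys ++ [pvNormCode a] := by
          simp [PySem.Set.add, hnm]
        rw [if_neg (by rintro (h | h); exact h0 h; exact hc h), hadd, hstep]
        have := ih (i+1) (d.insert (pvNormCode a) i)
        rw [hkeys] at this
        exact this

-- every stored position is below the running index, and positions are nondecreasing in dict order
theorem pv_pairwise (L : List String) (i : Int) (d : PySem.Dict String Int)
    (hb : ∀ p ∈ d.items, p.2 < i)
    (hp : d.items.Pairwise (fun a b => a.2 ≤ b.2)) :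
    ((PySem.List.enumerate L i).foldl pvStepB d).items.Pairwise (fun a b => a.2 ≤ b.2) := by
  induction L generalizing i d with
  | nil => exact hp
  | cons a t ih =>
    rw [PySem.List.enumerate_cons, List.foldl_cons]
    by_cases h0 : pvNormCode a = ""
    · rw [show pvStepB d (i, a) = d from by simp [pvStepB, h0]]
      exact ih (i + 1) d (fun p hm => lt_trans (hb p hm) (by omega)) hp
    · by_cases hcd : d.contains (pvNormCode a) = true
      · rw [show pvStepB d (i, a) = d from by simp [pvStepB, h0, PySem.Dict.setdefault, hcd]]
        exact ih (i + 1) d (fun p hm => lt_trans (hb p hm) (by omega)) hp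
      · have hcd' : d.contains (pvNormCode a) = false := by
          rw [Bool.eq_false_iff]; exact hcd
        have hstep : pvStepB d (i, a) = d.insert (pvNormCode a) i := by
          simp only [pvStepB, h0, PySem.Dict.setdefault, hcd', Bool.false_eq_true, ite_false]
          exact (PySem.Dict.ext (PySem.Dict.items_insert_of_not_contains (v := i) (h := hcd'))).symm
        rw [hstep]
        refine ih (i + 1) (d.insert (pvNormCode a) i) ?_ ?_
        · intro p hm
          rw [PySem.Dict.items_insert_of_not_contains (v := i) (h := hcd')] at hm
          rcases List.mem_append.mp hm with h | h
          · exact lt_trans (hb p h) (by omega)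
          · rw [List.mem_singleton.mp h]
            exact (by omega : (i : Int) < i + 1)
        · rw [PySem.Dict.items_insert_of_not_contains (v := i) (h := hcd')]
          refine List.pairwise_append.mpr ⟨hp, List.pairwise_singleton _ _, ?_⟩
          intro p hm q hq
          rw [List.mem_singleton.mp hq]
          exact le_of_lt (hb p hm)

-- ===== VERDICT (by name: the statement is the Claim_ definition above) =====
theorem normalize_period_list_spec : Claim_equal_normalize_period_list := by
  intro value _
  unfold Spec_normalize_period_list
  have hpw := pv_pairwise value 0 PySem.Dict.empty
    (by intro p hm; simp [PySem.Dict.empty] at hm) (by simp [PySem.Dict.empty])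
  have halt : normalize_period_list_alt value
      = (PySem.List.sorted ((PySem.List.enumerate value 0).foldl pvStepB PySem.Dict.empty).items
          (fun kv => kv.2) false).map (fun kv => kv.1) := rfl
  have hs : PySem.List.sorted
        ((PySem.List.enumerate value 0).foldl pvStepB PySem.Dict.empty).items
        (fun kv => kv.2) false
      = ((PySem.List.enumerate value 0).foldl pvStepB PySem.Dict.empty).items :=
    PySem.List.sorted_eq_self_of_pairwise _ _ hpw
  rw [halt, hs]
  exact (pv_keys_eq value 0 PySem.Dict.empty).trans (by simp [PySem.Dict.keys])
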